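-- pv_equiv track=rewrite | github.com/ahmedehhab/python_ITI | lab2.py | multiplicationTable
-- ===== SOURCE A (Python) =====
-- def multiplicationTable(number):
--     res=[]
--     for i in range(1,number+1):
--         list=[]
--         for j in range (1,i+1):
--             list.append(i*j)
--         res.append(list)
--     return res
-- ===== SOURCE B (Python) =====
-- def multiplicationTable(number):
--     return [list(range(i, i * i + 1, i)) for i in range(1, number + 1)]
-- ===== Notes on version B (the rewrite author's own statement) =====
-- stated objective: idiomatic
-- what changed: Each row is emitted as the strided arithmetic progression range(i, i*i+1, i) in a single comprehension, replacing the nested multiply-and-append accumulator loops (no per-element i*j multiplication).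
import Mathlib
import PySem

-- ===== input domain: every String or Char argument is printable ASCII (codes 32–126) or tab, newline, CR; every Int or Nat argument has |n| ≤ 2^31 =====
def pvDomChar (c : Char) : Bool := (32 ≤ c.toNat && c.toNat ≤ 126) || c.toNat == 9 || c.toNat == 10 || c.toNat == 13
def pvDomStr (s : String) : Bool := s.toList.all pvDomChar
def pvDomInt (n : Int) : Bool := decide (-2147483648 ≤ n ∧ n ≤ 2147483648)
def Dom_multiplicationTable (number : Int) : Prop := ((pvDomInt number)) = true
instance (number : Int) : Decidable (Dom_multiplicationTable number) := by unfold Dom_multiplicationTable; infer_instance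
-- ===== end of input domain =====

-- ===== PORT A =====
-- B builds each row as the strided range(i, i*i+1, i) instead of A's inner multiply-append loop (idiomatic).
def multiplicationTable (number : Int) : List (List Int) :=
  (PySem.List.pyRange 1 (number + 1) 1).foldl
    (fun res i =>
      res ++ [(PySem.List.pyRange 1 (i + 1) 1).foldl (fun l j => l ++ [i * j]) []])
    []

-- ===== PORT B =====
def multiplicationTable_alt (number : Int) : List (List Int) :=
  (PySem.List.pyRange 1 (number + 1) 1).map (fun i => PySem.List.pyRange i (i * i + 1) i)

-- ===== PRECONDITION & SPEC =====
def Spec_multiplicationTable (number : Int) (out : List (List Int)) : Prop := out = multiplicationTable_alt number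
instance (number : Int) (out : List (List Int)) : Decidable (Spec_multiplicationTable number out) := by unfold Spec_multiplicationTable; infer_instance

-- ===== CLAIM (what is proved, stated in full; the proofs are below) =====
def Claim_equal_multiplicationTable : Prop := ∀ (number : Int), Dom_multiplicationTable number → Spec_multiplicationTable number (multiplicationTable number)

-- ===== LEMMAS AND PROOFS =====

-- For 1 ≤ i, A's inner loop for row i produces exactly the strided range(i, i*i+1, i).
theorem row_eq (i : Int) (h1 : 1 ≤ i) :
    (PySem.List.pyRange 1 (i + 1) 1).foldl (fun l j => l ++ [i * j]) [] =
      PySem.List.pyRange i (i * i + 1) i := by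
  rw [PySem.List.foldl_append_singleton_eq_map, List.nil_append,
      PySem.List.pyRange_one, PySem.List.pyRange_of_pos _ _ (by omega : (0:Int) < i),
      List.map_map]
  have hb : i < i * i + 1 := by nlinarith
  rw [if_pos hb]
  have hnum : (i * i + 1 - i + i - 1) = i * i := by ring
  rw [hnum, Int.mul_ediv_cancel_left _ (by omega : i ≠ 0)]
  have hlen : (i + 1 - 1).toNat = i.toNat := by omega
  rw [hlen]
  refine List.map_congr_left ?_
  intro k _
  simp [Function.comp]
  ring

-- ===== VERDICT (by name: the statement is the Claim_ definition above) =====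
theorem multiplicationTable_spec : Claim_equal_multiplicationTable := by
  intro number _
  unfold Spec_multiplicationTable multiplicationTable multiplicationTable_alt
  rw [PySem.List.foldl_append_singleton_eq_map, List.nil_append]
  refine List.map_congr_left ?_
  intro i hi
  have h1 : (1 : Int) ≤ i := ((PySem.List.mem_pyRange_one).1 hi).1
  exact (row_eq i h1)
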